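-- pv_equiv track=rewrite | github.com/isierra93/UTN-TUPaD-P1 | Matemática/integradorMatePunto2Corregido.py | generacion
-- ===== SOURCE A (Python) =====
-- def generacion(array):
--     baby_boomers = 0
--     generacion_x = 0
--     millenials = 0
--     generacion_z = 0
--     respuesta = []
--     for num in array:
--         if num <= 1964:
--             baby_boomers += 1
--         elif 1964 < num <= 1980:
--             generacion_x += 1
--         elif 1980 < num <= 1996:
--             millenials += 1
--         else:
--             generacion_z += 1
--     respuesta.append(baby_boomers)
--     respuesta.append(generacion_x)
--     respuesta.append(millenials)
--     respuesta.append(generacion_z)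
--     return respuesta
-- ===== SOURCE B (Python) =====
-- def generacion(array):
--     # Cumulative-count formulation: count how many years fall at or below each
--     # boundary, then the four bucket sizes are differences of those cumulative counts.
--     c1 = sum(1 for x in array if x <= 1964)
--     c2 = sum(1 for x in array if x <= 1980)
--     c3 = sum(1 for x in array if x <= 1996)
--     return [c1, c2 - c1, c3 - c2, len(array) - c3]
-- ===== Notes on version B (the rewrite author's own statement) =====
-- stated objective: alternative
-- what changed: Replaces the single bucketing pass with four named counters by three cumulative threshold counts (years <= 1964, <= 1980, <= 1996) whose pairwise differences give the bucket sizes.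
import Mathlib
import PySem

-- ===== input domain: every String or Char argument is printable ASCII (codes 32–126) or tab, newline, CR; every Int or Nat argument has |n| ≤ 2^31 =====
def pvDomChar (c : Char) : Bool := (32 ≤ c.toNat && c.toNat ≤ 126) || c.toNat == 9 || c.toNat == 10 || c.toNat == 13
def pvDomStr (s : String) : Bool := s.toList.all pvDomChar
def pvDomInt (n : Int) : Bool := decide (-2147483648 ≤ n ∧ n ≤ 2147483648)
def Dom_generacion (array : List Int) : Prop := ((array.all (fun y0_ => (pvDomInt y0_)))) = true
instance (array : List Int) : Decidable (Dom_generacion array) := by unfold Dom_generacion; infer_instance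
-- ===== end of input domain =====

-- B replaces the single bucketing pass with four counters by three cumulative
-- threshold counts whose differences give the bucket sizes (alternative; same cost).

-- ===== PORT A =====
def generacion (array : List Int) : List Int :=
  let s := array.foldl (fun (s : Int × Int × Int × Int) num =>
    if num ≤ 1964 then (s.1 + 1, s.2.1, s.2.2.1, s.2.2.2)
    else if 1964 < num ∧ num ≤ 1980 then (s.1, s.2.1 + 1, s.2.2.1, s.2.2.2)
    else if 1980 < num ∧ num ≤ 1996 then (s.1, s.2.1, s.2.2.1 + 1, s.2.2.2)
    else (s.1, s.2.1, s.2.2.1, s.2.2.2 + 1)) (0, 0, 0, 0)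
  [s.1, s.2.1, s.2.2.1, s.2.2.2]

-- ===== PORT B =====
def generacion_alt (array : List Int) : List Int :=
  let c1 : Int := array.countP (fun x => decide (x ≤ 1964))
  let c2 : Int := array.countP (fun x => decide (x ≤ 1980))
  let c3 : Int := array.countP (fun x => decide (x ≤ 1996))
  [c1, c2 - c1, c3 - c2, (array.length : Int) - c3]

-- ===== PRECONDITION & SPEC =====
def Spec_generacion (array : List Int) (out : List Int) : Prop := out = generacion_alt array
instance (array : List Int) (out : List Int) : Decidable (Spec_generacion array out) := by unfold Spec_generacion; infer_instance

-- ===== CLAIM (what is proved, stated in full; the proofs are below) =====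
def Claim_equal_generacion : Prop := ∀ (array : List Int), Dom_generacion array → Spec_generacion array (generacion array)

-- ===== LEMMAS AND PROOFS =====
theorem generacion_loop (arr : List Int) : ∀ (a b c d : Int),
    arr.foldl (fun (s : Int × Int × Int × Int) num =>
      if num ≤ 1964 then (s.1 + 1, s.2.1, s.2.2.1, s.2.2.2)
      else if 1964 < num ∧ num ≤ 1980 then (s.1, s.2.1 + 1, s.2.2.1, s.2.2.2)
      else if 1980 < num ∧ num ≤ 1996 then (s.1, s.2.1, s.2.2.1 + 1, s.2.2.2)
      else (s.1, s.2.1, s.2.2.1, s.2.2.2 + 1)) (a, b, c, d)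
    = (a + (arr.countP (fun x => decide (x ≤ 1964)) : Int),
       b + ((arr.countP (fun x => decide (x ≤ 1980)) : Int)
            - (arr.countP (fun x => decide (x ≤ 1964)) : Int)),
       c + ((arr.countP (fun x => decide (x ≤ 1996)) : Int)
            - (arr.countP (fun x => decide (x ≤ 1980)) : Int)),
       d + ((arr.length : Int) - (arr.countP (fun x => decide (x ≤ 1996)) : Int))) := by
  induction arr with
  | nil => intro a b c d; simp
  | cons num rest ih =>
    intro a b c d
    simp only [List.foldl_cons, List.countP_cons, List.length_cons]
    by_cases h1 : num ≤ 1964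
    · have h2 : num ≤ 1980 := by omega
      have h3 : num ≤ 1996 := by omega
      rw [if_pos h1, ih]
      simp [h1, h2, h3, Prod.ext_iff]; ring_nf
    · by_cases h2 : num ≤ 1980
      · have h3 : num ≤ 1996 := by omega
        rw [if_neg h1, if_pos ⟨by omega, h2⟩, ih]
        simp [h1, h2, h3, Prod.ext_iff]; ring_nf
      · by_cases h3 : num ≤ 1996
        · rw [if_neg h1, if_neg (by omega), if_pos ⟨by omega, h3⟩, ih]
          simp [h1, h2, h3, Prod.ext_iff]; ring_nf
        · rw [if_neg h1, if_neg (by omega), if_neg (by omega), ih]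
          simp [h1, h2, h3, Prod.ext_iff]; ring_nf

-- ===== VERDICT (by name: the statement is the Claim_ definition above) =====
theorem generacion_spec : Claim_equal_generacion := by
  intro array _
  unfold Spec_generacion generacion generacion_alt
  rw [generacion_loop array 0 0 0 0]
  simp
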